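-- pv_equiv track=rewrite | github.com/p11x/APPDEV-courses | courses/Python/refactor_runner.py | find_fstring_positions
-- ===== SOURCE A (Python) =====
-- def is_inside_string(line: str, pos: int) -> bool:
--     """Check if position pos in line is inside a string literal."""
--     in_single = False
--     in_double = False
--     i = 0
--     while i < pos:
--         c = line[i]
--         if c == '\\' and i + 1 < len(line):
--             i += 2
--             continue
--         if c == "'" and not in_double:
--             in_single = not in_single
--         elif c == '"' and not in_single:
--             in_double = not in_double
--         i += 1
--     return in_single or in_double
--
-- def find_fstring_positions(line: str) -> list:
--     """Find positions of actual f-strings in a line."""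
--     positions = []
--     i = 0
--
--     while i < len(line):
--         if line[i:i+2] in ['f"', "f'"]:
--             if is_inside_string(line, i):
--                 i += 1
--                 continue
--
--             if i == 0 or line[i-1] in '=([{,: ':
--                 quote = line[i:i+2]
--                 start = i
--                 i += 2
--                 quote_char = quote[1]
--                 while i < len(line):
--                     if line[i] == '\\':
--                         i += 2
--                         continue
--                     if line[i] == quote_char:
--                         if i > 0 and line[i-1] == '\\':
--                             i += 1
--                             continue
--                         positions.append((start, i + 1))
--                         break
--                     i += 1
--             else:
--                 i += 1
--         else:
--             i += 1
--
--     return positions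
-- ===== SOURCE B (Python) =====
-- def find_fstring_positions(line: str) -> list:
--     """Find positions of actual f-strings in a line.
--
--     One left-to-right pass precomputes, for every index, whether it lies
--     inside a (non-f) string literal; the main scan then uses O(1) lookups
--     and jumps straight past each f-string body found by a linear search
--     for its unescaped closing quote.
--     """
--     n = len(line)
--     # single pass: inside[p] == is-inside-a-string-literal flag at position p
--     inside = [False] * n
--     in_s = in_d = False
--     p = 0
--     while p < n:
--         inside[p] = in_s or in_d
--         c = line[p]
--         if c == '\\' and p + 1 < n:
--             inside[p + 1] = in_s or in_d
--             p += 2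
--             continue
--         if c == "'" and not in_d:
--             in_s = not in_s
--         elif c == '"' and not in_s:
--             in_d = not in_d
--         p += 1
--
--     positions = []
--     i = 0
--     while i < n - 1:
--         if line[i] == 'f' and line[i + 1] in '"\'':
--             if inside[i]:
--                 i += 1
--                 continue
--             if i == 0 or line[i - 1] in '=([{,: ':
--                 qc = line[i + 1]
--                 # closing quote: first unescaped occurrence of qc after the opener
--                 j = i + 2
--                 while j < n and not (line[j] == qc and line[j - 1] != '\\'):
--                     j += 1
--                 if j < n:
--                     positions.append((i, j + 1))
--                 i = j          # resume at the closing quote (next iteration steps past it)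
--                 continue
--         i += 1
--     return positions
-- ===== Notes on version B (the rewrite author's own statement) =====
-- stated objective: alternative
-- what changed: A re-scans the whole prefix (is_inside_string) for every f-string candidate; B instead precomputes the inside-string flag for every position in one pass and then does a single scan with flag lookups and a direct linear search for the unescaped closing quote.
import Mathlib
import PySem

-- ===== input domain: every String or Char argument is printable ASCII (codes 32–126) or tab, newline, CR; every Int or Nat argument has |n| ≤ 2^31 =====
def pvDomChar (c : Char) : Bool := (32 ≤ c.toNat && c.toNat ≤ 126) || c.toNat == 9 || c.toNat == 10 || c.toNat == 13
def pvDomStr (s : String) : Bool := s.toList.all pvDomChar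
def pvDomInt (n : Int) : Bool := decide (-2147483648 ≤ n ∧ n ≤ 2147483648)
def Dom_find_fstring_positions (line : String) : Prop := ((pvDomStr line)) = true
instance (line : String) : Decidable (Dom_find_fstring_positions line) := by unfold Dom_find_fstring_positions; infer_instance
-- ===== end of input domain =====

-- B replaces A's per-candidate rescan of the prefix (is_inside_string) by one precomputed
-- pass of inside-string flags and a direct linear search for the closing quote.
-- (Each while-loop is ported with a structural fuel counter, always called with enough
-- fuel — the loop index strictly increases each iteration — so the ports are exact.)

-- ===== PORT A =====
-- is_inside_string: state machine over the prefix [0, pos); fuel = pos suffices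
def isInsideAux (s : List Char) (pos : Nat) (fuel : Nat) (i : Nat) (ins ind : Bool) : Bool :=
  match fuel with
  | 0 => ins || ind
  | fuel + 1 =>
    if i < pos then
      let c := s.getD i ' '   -- line[i]; callers have i < pos ≤ len, so exact
      if c == '\\' && decide (i + 1 < s.length) then isInsideAux s pos fuel (i + 2) ins ind
      else if c == '\'' && !ind then isInsideAux s pos fuel (i + 1) (!ins) ind
      else if c == '"' && !ins then isInsideAux s pos fuel (i + 1) ins (!ind)
      else isInsideAux s pos fuel (i + 1) ins ind
    else ins || ind

-- the inner while-loop of A: returns (final i, appended pair if the break fired)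
def innerA (s : List Char) (qc : Char) (start : Nat) (fuel : Nat) (i : Nat) : Nat × Option (Int × Int) :=
  match fuel with
  | 0 => (i, none)
  | fuel + 1 =>
    if i < s.length then
      if s.getD i ' ' == '\\' then innerA s qc start fuel (i + 2)
      else if s.getD i ' ' == qc then
        if decide (0 < i) && (s.getD (i - 1) ' ' == '\\') then innerA s qc start fuel (i + 1)
        else (i, some ((start : Int), (i : Int) + 1))
      else innerA s qc start fuel (i + 1)
    else (i, none)

-- the outer while-loop of A (one fuel unit per iteration; i strictly increases each time)
def outerA (s : List Char) (fuel : Nat) (i : Nat) : List (Int × Int) :=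
  match fuel with
  | 0 => []
  | fuel + 1 =>
    if i < s.length then
      let two := PySem.List.slice s (some (i : Int)) (some ((i : Int) + 2))
      if two == ['f', '"'] || two == ['f', '\''] then
        if isInsideAux s i i 0 false false then outerA s fuel (i + 1)
        else if i == 0 || "=([{,: ".toList.contains (s.getD (i - 1) ' ') then
          let qc := two.getD 1 ' '      -- quote[1]; the slice has length 2 here
          let r := innerA s qc i (s.length + 1) (i + 2)
          match r.2 with
          | some p => p :: outerA s fuel r.1
          | none => outerA s fuel r.1
        else outerA s fuel (i + 1)
      else outerA s fuel (i + 1)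
    else []

def find_fstring_positions (line : String) : List (Int × Int) :=
  outerA line.toList (line.toList.length + 1) 0

-- ===== PORT B =====
-- one pass: inside-string flag for every position from i on; fuel = s.length suffices
def flagsAux (s : List Char) (fuel : Nat) (i : Nat) (ins ind : Bool) : List Bool :=
  match fuel with
  | 0 => []
  | fuel + 1 =>
    if i < s.length then
      let st := ins || ind
      let c := s.getD i ' '
      if c == '\\' && decide (i + 1 < s.length) then st :: st :: flagsAux s fuel (i + 2) ins ind
      else if c == '\'' && !ind then st :: flagsAux s fuel (i + 1) (!ins) ind
      else if c == '"' && !ins then st :: flagsAux s fuel (i + 1) ins (!ind)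
      else st :: flagsAux s fuel (i + 1) ins ind
    else []

-- closing quote: first j with line[j] == qc and line[j-1] != '\\'
def findClose (s : List Char) (qc : Char) (fuel : Nat) (j : Nat) : Nat :=
  match fuel with
  | 0 => j
  | fuel + 1 =>
    if j < s.length then
      if s.getD j ' ' == qc && !(s.getD (j - 1) ' ' == '\\') then j
      else findClose s qc fuel (j + 1)
    else j

-- the main scan of B (same fuel discipline as A's loop)
def outerB (s : List Char) (inside : List Bool) (fuel : Nat) (i : Nat) : List (Int × Int) :=
  match fuel with
  | 0 => []
  | fuel + 1 =>
    if i < s.length - 1 then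
      if s.getD i ' ' == 'f' && (s.getD (i + 1) ' ' == '"' || s.getD (i + 1) ' ' == '\'') then
        if inside.getD i false then outerB s inside fuel (i + 1)
        else if i == 0 || "=([{,: ".toList.contains (s.getD (i - 1) ' ') then
          let qc := s.getD (i + 1) ' '
          let j := findClose s qc (s.length + 1) (i + 2)
          if j < s.length then ((i : Int), (j : Int) + 1) :: outerB s inside fuel j
          else outerB s inside fuel j
        else outerB s inside fuel (i + 1)
      else outerB s inside fuel (i + 1)
    else []

def find_fstring_positions_alt (line : String) : List (Int × Int) :=
  let s := line.toList
  outerB s (flagsAux s s.length 0 false false) (s.length + 1) 0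

-- ===== PRECONDITION & SPEC =====
def Spec_find_fstring_positions (line : String) (out : List (Int × Int)) : Prop := out = find_fstring_positions_alt line
instance (line : String) (out : List (Int × Int)) : Decidable (Spec_find_fstring_positions line out) := by unfold Spec_find_fstring_positions; infer_instance

-- ===== CLAIM (what is proved, stated in full; the proofs are below) =====
def Claim_equal_find_fstring_positions : Prop := ∀ (line : String), Dom_find_fstring_positions line → Spec_find_fstring_positions line (find_fstring_positions line)

-- ===== LEMMAS AND PROOFS =====

theorem ite_true_of_eq {α : Sort u} {b : Bool} (h : b = true) (t e : α) :
    (if b = true then t else e) = t := by subst h; rfl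

theorem ite_false_of_eq {α : Sort u} {b : Bool} (h : b = false) (t e : α) :
    (if b = true then t else e) = e := by subst h; rfl

theorem slice2 (s : List Char) (i : Nat) (h : i < s.length) :
    PySem.List.slice s (some (i : Int)) (some ((i : Int) + 2)) =
      if i + 1 < s.length then [s.getD i ' ', s.getD (i + 1) ' '] else [s.getD i ' '] := by
  have h2 : ((i : Int) + 2) = (((i + 2 : Nat)) : Int) := by push_cast; ring
  have h3 : i + 2 - i = 2 := by omega
  rw [h2, PySem.List.slice_natCast, h3]
  rw [List.drop_eq_getElem_cons h]
  have e1 : s.getD i ' ' = s[i] := by simp [List.getD_eq_getElem?_getD, h]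
  by_cases h4 : i + 1 < s.length
  · have e2 : s.getD (i + 1) ' ' = s[i + 1] := by
      simp [List.getD_eq_getElem?_getD, h4]
    rw [List.drop_eq_getElem_cons h4, if_pos h4, e1, e2]
    rfl
  · have h5 : s.drop (i + 1) = [] := by rw [List.drop_eq_nil_iff]; omega
    rw [h5, if_neg h4, e1]
    rfl

theorem flags_head (s : List Char) (f j : Nat) (ins ind : Bool) (hjl : j < s.length) :
    (flagsAux s (f + 1) j ins ind).getD 0 false = (ins || ind) := by
  rw [flagsAux.eq_def]
  simp only
  rw [if_pos hjl]
  by_cases h1 : (s.getD j ' ' == '\\' && decide (j + 1 < s.length)) = true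
  · rw [ite_true_of_eq h1]; rfl
  · rw [ite_false_of_eq (Bool.not_eq_true _ ▸ h1 : _ = false)]
    by_cases h2 : (s.getD j ' ' == '\'' && !ind) = true
    · rw [ite_true_of_eq h2]; rfl
    · rw [ite_false_of_eq (Bool.not_eq_true _ ▸ h2 : _ = false)]
      by_cases h3 : (s.getD j ' ' == '"' && !ins) = true
      · rw [ite_true_of_eq h3]; rfl
      · rw [ite_false_of_eq (Bool.not_eq_true _ ▸ h3 : _ = false)]; rfl

theorem flags_getD (s : List Char) :
    ∀ f2 f1 j ins ind pos, pos < s.length → j ≤ pos → s.length - j ≤ f1 → pos - j ≤ f2 →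
      (flagsAux s f1 j ins ind).getD (pos - j) false = isInsideAux s pos f2 j ins ind := by
  intro f2
  induction f2 with
  | zero =>
    intro f1 j ins ind pos h1 h2 hf1 h3
    have hpj : pos = j := by omega
    subst hpj
    obtain ⟨f1', rfl⟩ : ∃ f1', f1 = f1' + 1 := ⟨f1 - 1, by omega⟩
    rw [Nat.sub_self]
    exact flags_head s f1' pos ins ind h1
  | succ f2 ih =>
    intro f1 j ins ind pos h1 h2 hf1 h3
    obtain ⟨f1', rfl⟩ : ∃ f1', f1 = f1' + 1 := ⟨f1 - 1, by omega⟩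
    by_cases hpj : pos = j
    · subst hpj
      rw [isInsideAux.eq_def]
      simp only
      rw [if_neg (by omega : ¬ pos < pos), Nat.sub_self]
      exact flags_head s f1' pos ins ind h1
    · have hj : j < pos := by omega
      have hjl : j < s.length := by omega
      rw [flagsAux.eq_def, isInsideAux.eq_def]
      simp only
      rw [if_pos hjl, if_pos hj]
      by_cases hc1 : (s.getD j ' ' == '\\' && decide (j + 1 < s.length)) = true
      · rw [ite_true_of_eq hc1, ite_true_of_eq hc1]
        by_cases hp1 : pos = j + 1
        · subst hp1
          have e : j + 1 - j = 1 := by omega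
          rw [e]
          cases f2 with
          | zero => simp [isInsideAux]
          | succ f2 =>
            rw [isInsideAux.eq_def]
            simp only
            rw [if_neg (by omega : ¬ j + 2 < j + 1)]
            simp
        · have hsplit : pos - j = (pos - (j + 2)) + 1 + 1 := by omega
          rw [hsplit]
          simp only [List.getD_cons_succ]
          exact ih f1' (j + 2) ins ind pos h1 (by omega) (by omega) (by omega)
      · have hc1f : (s.getD j ' ' == '\\' && decide (j + 1 < s.length)) = false :=
          Bool.not_eq_true _ ▸ hc1
        rw [ite_false_of_eq hc1f, ite_false_of_eq hc1f]
        have hsplit : pos - j = (pos - (j + 1)) + 1 := by omega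
        by_cases hc2 : (s.getD j ' ' == '\'' && !ind) = true
        · rw [ite_true_of_eq hc2, ite_true_of_eq hc2, hsplit]
          simp only [List.getD_cons_succ]
          exact ih f1' (j + 1) (!ins) ind pos h1 (by omega) (by omega) (by omega)
        · have hc2f : (s.getD j ' ' == '\'' && !ind) = false := Bool.not_eq_true _ ▸ hc2
          rw [ite_false_of_eq hc2f, ite_false_of_eq hc2f]
          by_cases hc3 : (s.getD j ' ' == '"' && !ins) = true
          · rw [ite_true_of_eq hc3, ite_true_of_eq hc3, hsplit]
            simp only [List.getD_cons_succ]
            exact ih f1' (j + 1) ins (!ind) pos h1 (by omega) (by omega) (by omega)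
          · have hc3f : (s.getD j ' ' == '"' && !ins) = false := Bool.not_eq_true _ ▸ hc3
            rw [ite_false_of_eq hc3f, ite_false_of_eq hc3f, hsplit]
            simp only [List.getD_cons_succ]
            exact ih f1' (j + 1) ins ind pos h1 (by omega) (by omega) (by omega)

theorem inner_close (s : List Char) (qc : Char) (st : Nat) (hq : qc ≠ '\\') :
    ∀ f1 f2 j, 1 ≤ j → s.length - j ≤ f1 → s.length - j ≤ f2 →
      (s.length ≤ findClose s qc f2 j →
        (innerA s qc st f1 j).2 = none ∧ s.length ≤ (innerA s qc st f1 j).1)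
    ∧ (findClose s qc f2 j < s.length →
        innerA s qc st f1 j = (findClose s qc f2 j, some ((st : Int), (findClose s qc f2 j : Int) + 1))) := by
  intro f1
  induction f1 with
  | zero =>
    intro f2 j hj hf1 hf2
    have hnl : ¬ j < s.length := by omega
    have hfc : findClose s qc f2 j = j := by
      cases f2 with
      | zero => rfl
      | succ f2 => rw [findClose.eq_def]; simp only; rw [if_neg hnl]
    have hA : innerA s qc st 0 j = (j, none) := rfl
    rw [hfc, hA]
    exact ⟨fun _ => ⟨rfl, by omega⟩, fun h' => absurd h' hnl⟩
  | succ f1 ih =>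
    intro f2 j hj hf1 hf2
    by_cases hjl : j < s.length
    · obtain ⟨f2', rfl⟩ : ∃ f2', f2 = f2' + 1 := ⟨f2 - 1, by omega⟩
      rw [innerA.eq_def, findClose.eq_def]
      simp only
      rw [if_pos hjl, if_pos hjl]
      by_cases hc : s.getD j ' ' = '\\'
      · have hcb : (s.getD j ' ' == '\\') = true := beq_iff_eq.mpr hc
        have hcond : (s.getD j ' ' == qc && !(s.getD (j - 1) ' ' == '\\')) = false := by
          have h' : (s.getD j ' ' == qc) = false :=
            beq_eq_false_iff_ne.mpr (by rw [hc]; exact fun h' => hq h'.symm)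
          rw [h', Bool.false_and]
        rw [ite_true_of_eq hcb, ite_false_of_eq hcond]
        by_cases hj1 : j + 1 < s.length
        · obtain ⟨f2'', rfl⟩ : ∃ f2'', f2' = f2'' + 1 := ⟨f2' - 1, by omega⟩
          have hstep : findClose s qc (f2'' + 1) (j + 1) = findClose s qc f2'' (j + 2) := by
            rw [findClose.eq_def]
            simp only
            rw [if_pos hj1]
            have e : j + 1 - 1 = j := by omega
            have hcond2 : (s.getD (j + 1) ' ' == qc && !(s.getD (j + 1 - 1) ' ' == '\\')) = false := by
              rw [e, hcb, Bool.not_true, Bool.and_false]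
            rw [ite_false_of_eq hcond2]
          rw [hstep]
          exact ih f2'' (j + 2) (by omega) (by omega) (by omega)
        · have hstep : findClose s qc f2' (j + 1) = j + 1 := by
            cases f2' with
            | zero => rfl
            | succ f2'' => rw [findClose.eq_def]; simp only; rw [if_neg hj1]
          rw [hstep]
          have hA : innerA s qc st f1 (j + 2) = (j + 2, none) := by
            cases f1 with
            | zero => rfl
            | succ f1' => rw [innerA.eq_def]; simp only; rw [if_neg (by omega : ¬ j + 2 < s.length)]
          rw [hA]
          exact ⟨fun _ => ⟨rfl, by omega⟩, fun h' => absurd h' (by omega)⟩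
      · have hcb : (s.getD j ' ' == '\\') = false := beq_eq_false_iff_ne.mpr hc
        rw [ite_false_of_eq hcb]
        by_cases hcq : s.getD j ' ' = qc
        · have hcqt : (s.getD j ' ' == qc) = true := beq_iff_eq.mpr hcq
          rw [ite_true_of_eq hcqt]
          by_cases hbs : s.getD (j - 1) ' ' = '\\'
          · have hbst : (s.getD (j - 1) ' ' == '\\') = true := beq_iff_eq.mpr hbs
            have hcond : (s.getD j ' ' == qc && !(s.getD (j - 1) ' ' == '\\')) = false := by
              rw [hbst, Bool.not_true, Bool.and_false]
            have hdec : (decide (0 < j) && (s.getD (j - 1) ' ' == '\\')) = true := by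
              rw [hbst, Bool.and_true, decide_eq_true_eq]; omega
            rw [ite_true_of_eq hdec, ite_false_of_eq hcond]
            exact ih f2' (j + 1) (by omega) (by omega) (by omega)
          · have hbsf : (s.getD (j - 1) ' ' == '\\') = false := beq_eq_false_iff_ne.mpr hbs
            have hcond : (s.getD j ' ' == qc && !(s.getD (j - 1) ' ' == '\\')) = true := by
              rw [hcqt, hbsf, Bool.not_false, Bool.true_and]
            have hdec : (decide (0 < j) && (s.getD (j - 1) ' ' == '\\')) = false := by
              rw [hbsf, Bool.and_false]
            rw [ite_false_of_eq hdec, ite_true_of_eq hcond]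
            exact ⟨fun h' => absurd hjl (by omega), fun _ => rfl⟩
        · have hcqf : (s.getD j ' ' == qc) = false := beq_eq_false_iff_ne.mpr hcq
          have hcond : (s.getD j ' ' == qc && !(s.getD (j - 1) ' ' == '\\')) = false := by
            rw [hcqf, Bool.false_and]
          rw [ite_false_of_eq hcqf, ite_false_of_eq hcond]
          exact ih f2' (j + 1) (by omega) (by omega) (by omega)
    · have hA : innerA s qc st (f1 + 1) j = (j, none) := by
        rw [innerA.eq_def]; simp only; rw [if_neg hjl]
      have hfc : findClose s qc f2 j = j := by
        cases f2 with
        | zero => rfl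
        | succ f2' => rw [findClose.eq_def]; simp only; rw [if_neg hjl]
      rw [hA, hfc]
      exact ⟨fun _ => ⟨rfl, by omega⟩, fun h' => absurd h' hjl⟩

theorem match_cond (c0 c1 : Char) :
    (([c0, c1] == ['f', '"']) || ([c0, c1] == ['f', '\''])) =
      (c0 == 'f' && (c1 == '"' || c1 == '\'')) := by
  cases h0 : c0 == 'f' <;> cases h1 : c1 == '"' <;> cases h2 : c1 == '\'' <;>
    simp [h0, h1, h2]

theorem singleton_match (a : Char) :
    (([a] == ['f', '"']) || ([a] == ['f', '\''])) = false := by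
  cases h0 : a == 'f' <;> simp [h0]

theorem outerA_nil (s : List Char) (k i : Nat) (h : ¬ i < s.length) : outerA s k i = [] := by
  cases k with
  | zero => rfl
  | succ k => rw [outerA.eq_def]; exact if_neg h

theorem outerB_nil (s : List Char) (inside : List Bool) (k i : Nat) (h : ¬ i < s.length - 1) :
    outerB s inside k i = [] := by
  cases k with
  | zero => rfl
  | succ k => rw [outerB.eq_def]; exact if_neg h

theorem outer_eq (s : List Char) :
    ∀ k i, outerA s k i = outerB s (flagsAux s s.length 0 false false) k i := by
  intro k
  induction k with
  | zero => intro i; rfl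
  | succ k ih =>
    intro i
    by_cases hi : i < s.length
    · simp only [outerA]
      rw [if_pos hi]
      by_cases hi1 : i + 1 < s.length
      · simp only [outerB]
        rw [if_pos (show i < s.length - 1 by omega)]
        simp only [slice2 s i hi, hi1, if_true, match_cond]
        by_cases hb : (s.getD i ' ' == 'f' && (s.getD (i + 1) ' ' == '"' || s.getD (i + 1) ' ' == '\'')) = true
        · rw [ite_true_of_eq hb, ite_true_of_eq hb]
          have hflag : (flagsAux s s.length 0 false false).getD i false = isInsideAux s i i 0 false false := by
            have := flags_getD s i s.length 0 false false i hi (by omega) (by omega) (by omega)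
            simpa using this
          rw [hflag]
          by_cases hin : isInsideAux s i i 0 false false = true
          · rw [ite_true_of_eq hin, ite_true_of_eq hin]
            exact ih (i + 1)
          · have hinf : isInsideAux s i i 0 false false = false := Bool.not_eq_true _ ▸ hin
            rw [ite_false_of_eq hinf, ite_false_of_eq hinf]
            by_cases hprev : (i == 0 || "=([{,: ".toList.contains (s.getD (i - 1) ' ')) = true
            · rw [ite_true_of_eq hprev, ite_true_of_eq hprev]
              simp only [List.getD_cons_succ, List.getD_cons_zero]
              have hq : s.getD (i + 1) ' ' ≠ '\\' := by
                have hb' := (Bool.and_eq_true _ _).mp hb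
                rcases (Bool.or_eq_true _ _).mp hb'.2 with h' | h' <;>
                  · have := beq_iff_eq.mp h'; rw [this]; decide
              have hic := inner_close s (s.getD (i + 1) ' ') i hq (s.length + 1) (s.length + 1)
                (i + 2) (by omega) (by omega) (by omega)
              by_cases hm : findClose s (s.getD (i + 1) ' ') (s.length + 1) (i + 2) < s.length
              · have hA := hic.2 hm
                simp only [hA, if_pos hm]
                exact congrArg _ (ih (findClose s (s.getD (i + 1) ' ') (s.length + 1) (i + 2)))
              · obtain ⟨hn, hge⟩ := hic.1 (by omega)
                simp only [hn, if_neg hm]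
                rw [outerA_nil s k _ (by omega),
                  outerB_nil s (flagsAux s s.length 0 false false) k _ (by omega)]
            · have hprevf : (i == 0 || "=([{,: ".toList.contains (s.getD (i - 1) ' ')) = false :=
                Bool.not_eq_true _ ▸ hprev
              rw [ite_false_of_eq hprevf, ite_false_of_eq hprevf]
              exact ih (i + 1)
        · have hbf : (s.getD i ' ' == 'f' && (s.getD (i + 1) ' ' == '"' || s.getD (i + 1) ' ' == '\'')) = false :=
            Bool.not_eq_true _ ▸ hb
          rw [ite_false_of_eq hbf, ite_false_of_eq hbf]
          exact ih (i + 1)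
      · simp only [slice2 s i hi, hi1, if_false]
        rw [ite_false_of_eq (singleton_match (s.getD i ' '))]
        rw [outerA_nil s k (i + 1) (by omega),
          outerB_nil s (flagsAux s s.length 0 false false) (k + 1) i (by omega)]
    · rw [outerA_nil s (k + 1) i hi,
        outerB_nil s (flagsAux s s.length 0 false false) (k + 1) i (by omega)]

-- ===== VERDICT (by name: the statement is the Claim_ definition above) =====
theorem find_fstring_positions_spec : Claim_equal_find_fstring_positions := by
  intro line _
  unfold Spec_find_fstring_positions find_fstring_positions find_fstring_positions_alt
  exact outer_eq line.toList (line.toList.length + 1) 0
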